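-- pv_equiv track=rewrite | github.com/dertty/sofiahack1 | preprossor.py | filter_roman
-- ===== SOURCE A (Python) =====
-- def filter_roman(input_string):
--   def roman_to_int(s):
--     if len(s)==0:
--       return ''
--     rom_val = {'i': 1, 'v': 5, 'x': 10, 'l': 50, 'c': 100, 'd': 500, 'm': 1000}
--     int_val = 0
--     for i in range(len(s)):
--       if s[i] not in rom_val:
--         return s
--       if i > 0 and rom_val[s[i]] > rom_val[s[i - 1]]:
--         int_val += rom_val[s[i]] - 2 * rom_val[s[i - 1]]
--       else:
--         int_val += rom_val[s[i]]
--     return str(int_val)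
--
--   splited_string = input_string.split(' ')
--
--   for i in range(len(splited_string)):
--     splited_string[i] = roman_to_int(splited_string[i] )
--
--   result = ' '.join(splited_string)
--   return result
-- ===== SOURCE B (Python) =====
-- def filter_roman(input_string):
--     vals = {'i': 1, 'v': 5, 'x': 10, 'l': 50, 'c': 100, 'd': 500, 'm': 1000}
--
--     def conv(word):
--         if not word:
--             return ''
--         if any(ch not in vals for ch in word):
--             return word
--         total = 0
--         prev = 0
--         for ch in reversed(word):
--             v = vals[ch]
--             total = total - v if v < prev else total + v
--             prev = v
--         return str(total)
--
--     return ' '.join(conv(w) for w in input_string.split(' '))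
-- ===== Notes on version B (the rewrite author's own statement) =====
-- stated objective: alternative
-- what changed: The inner word converter validates every character up front and then scans the word right-to-left, subtracting a value smaller than its right neighbour, instead of A's indexed left-to-right scan with the -2*prev correction and early return on the first invalid character.
import Mathlib
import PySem

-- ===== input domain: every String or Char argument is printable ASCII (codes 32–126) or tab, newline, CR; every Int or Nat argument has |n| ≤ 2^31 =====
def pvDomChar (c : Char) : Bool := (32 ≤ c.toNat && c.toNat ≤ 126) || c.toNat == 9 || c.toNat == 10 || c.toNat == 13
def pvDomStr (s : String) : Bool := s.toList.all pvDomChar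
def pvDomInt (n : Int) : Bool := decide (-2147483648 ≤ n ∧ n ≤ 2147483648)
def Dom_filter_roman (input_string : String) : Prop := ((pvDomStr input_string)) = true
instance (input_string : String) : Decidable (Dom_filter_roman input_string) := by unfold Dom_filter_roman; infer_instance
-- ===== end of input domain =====

-- B rewrites the inner word converter: validate all characters up front, then scan right-to-left
-- adding/subtracting against the previous (right-hand) value, instead of A's left-to-right indexed
-- scan with a -2*prev correction and early return; objective: alternative (same cost).

-- shared literal: the rom_val dict of both Pythons
def romVal (c : Char) : Option Int :=
  (PySem.Dict.mk [('i', 1), ('v', 5), ('x', 10), ('l', 50), ('c', 100), ('d', 500), ('m', 1000)]).get? c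

-- ===== PORT A =====
-- A's 'for i in range(len(s))' rendered as structural recursion carrying rom_val[s[i-1]] (the
-- previous character's value; 'none' ↔ i == 0); 'return s' on an invalid character returns orig.
def romanLoopA (orig : List Char) (rest : List Char) (prev : Option Int) (intVal : Int) : List Char :=
  match rest with
  | [] => PySem.Int.toChars intVal
  | c :: rest' =>
    match romVal c with
    | none => orig
    | some v =>
      let intVal' :=
        match prev with
        | some p => if v > p then intVal + (v - 2 * p) else intVal + v
        | none => intVal + v
      romanLoopA orig rest' (some v) intVal'

def romanToIntA (s : List Char) : List Char :=
  if PySem.Chars.len s = 0 then []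
  else romanLoopA s s none 0

def filter_roman (input_string : String) : String :=
  let splited := PySem.Chars.splitOn input_string.toList [' ']
  String.mk (PySem.Chars.join [' '] (splited.map romanToIntA))

-- ===== PORT B =====
def romanToIntB (w : List Char) : List Char :=
  if w = [] then []
  else if ¬ (w.all (fun c => (romVal c).isSome)) then w
  else
    let st := w.reverse.foldl
      (fun (st : Int × Int) c =>
        let v := (romVal c).getD 0
        (if v < st.2 then st.1 - v else st.1 + v, v)) (0, 0)
    PySem.Int.toChars st.1

def filter_roman_alt (input_string : String) : String :=
  String.mk (PySem.Chars.join [' ']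
    ((PySem.Chars.splitOn input_string.toList [' ']).map romanToIntB))

-- ===== PRECONDITION & SPEC =====
def Spec_filter_roman (input_string : String) (out : String) : Prop := out = filter_roman_alt input_string
instance (input_string : String) (out : String) : Decidable (Spec_filter_roman input_string out) := by unfold Spec_filter_roman; infer_instance

-- ===== CLAIM (what is proved, stated in full; the proofs are below) =====
def Claim_equal_filter_roman : Prop := ∀ (input_string : String), Dom_filter_roman input_string → Spec_filter_roman input_string (filter_roman input_string)

-- ===== LEMMAS AND PROOFS =====

-- A's signed left-to-right total with a given previous value
def gval (prev : Option Int) : List Char → Int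
  | [] => 0
  | c :: rest =>
    let v := (romVal c).getD 0
    (match prev with
     | some p => if v > p then v - 2 * p else v
     | none => v) + gval (some v) rest

-- B's signed right-to-left total, written left-to-right: a value is negated iff smaller than its right neighbour
def bval : List Char → Int
  | [] => 0
  | c :: rest =>
    let v := (romVal c).getD 0
    (match rest with
     | [] => v
     | c' :: _ => if v < (romVal c').getD 0 then -v else v) + bval rest

lemma romVal_pos {c : Char} {v : Int} (h : romVal c = some v) : 0 < v := by
  simp only [romVal, PySem.Dict.get?] at h
  repeat' split at h
  all_goals simp_all
  all_goals omega

lemma loopA_invalid (orig rest : List Char) (prev : Option Int) (acc : Int)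
    (h : ∃ c ∈ rest, romVal c = none) : romanLoopA orig rest prev acc = orig := by
  induction rest generalizing prev acc with
  | nil => simp at h
  | cons c rest' ih =>
    simp only [romanLoopA]
    cases hv : romVal c with
    | none => rfl
    | some v =>
      apply ih
      rcases h with ⟨d, hd, hdn⟩
      rcases List.mem_cons.mp hd with rfl | hd'
      · simp [hv] at hdn
      · exact ⟨d, hd', hdn⟩

lemma loopA_valid (orig rest : List Char) (prev : Option Int) (acc : Int)
    (h : ∀ c ∈ rest, (romVal c).isSome) :
    romanLoopA orig rest prev acc = PySem.Int.toChars (acc + gval prev rest) := by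
  induction rest generalizing prev acc with
  | nil => simp [romanLoopA, gval]
  | cons c rest' ih =>
    have hc := h c (by simp)
    cases hv : romVal c with
    | none => simp [hv] at hc
    | some v =>
      simp only [romanLoopA, hv]
      rw [ih _ _ (fun d hd => h d (by simp [hd]))]
      cases prev with
      | none => simp [gval, hv]; ring_nf
      | some p =>
        simp only [gval, hv, Option.getD_some]
        split <;> ring_nf

lemma gval_shift (w : List Char) (p : Int)
    (h : ∀ c ∈ w, (romVal c).isSome) :
    gval (some p) w = gval none w -
      (match w with
       | [] => 0
       | c :: _ => if (romVal c).getD 0 > p then 2 * p else 0) := by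
  cases w with
  | nil => simp [gval]
  | cons c rest => simp only [gval]; split <;> ring_nf

lemma gval_eq_bval (w : List Char) (h : ∀ c ∈ w, (romVal c).isSome) :
    gval none w = bval w := by
  induction w with
  | nil => rfl
  | cons c rest ih =>
    have hrest : ∀ d ∈ rest, (romVal d).isSome := fun d hd => h d (by simp [hd])
    simp only [gval, bval]
    rw [gval_shift rest ((romVal c).getD 0) hrest, ih hrest]
    cases rest with
    | nil => simp
    | cons c' rest' =>
      by_cases hlt : (romVal c).getD 0 < (romVal c').getD 0
      · simp only [if_pos hlt, if_pos (show (romVal c').getD 0 > (romVal c).getD 0 from hlt)]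
        ring
      · simp only [if_neg hlt, if_neg (show ¬ (romVal c').getD 0 > (romVal c).getD 0 from hlt)]
        ring

-- B's reverse foldl as a foldr, computed: result is (bval w, value of w's head)
lemma foldB (w : List Char) (h : ∀ c ∈ w, (romVal c).isSome) :
    w.reverse.foldl
      (fun (st : Int × Int) c =>
        let v := (romVal c).getD 0
        (if v < st.2 then st.1 - v else st.1 + v, v)) (0, 0)
    = (bval w, match w with | [] => 0 | c :: _ => (romVal c).getD 0) := by
  induction w with
  | nil => rfl
  | cons c rest ih =>
    have hrest : ∀ d ∈ rest, (romVal d).isSome := fun d hd => h d (by simp [hd])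
    have hc := h c (by simp)
    rw [List.reverse_cons, List.foldl_append, ih hrest]
    simp only [List.foldl_cons, List.foldl_nil, bval]
    cases rest with
    | nil =>
      obtain ⟨v, hv⟩ := Option.isSome_iff_exists.mp hc
      have := romVal_pos hv
      simp [bval, hv]
      omega
    | cons c' rest' =>
      by_cases hlt : (romVal c).getD 0 < (romVal c').getD 0
      · simp [hlt]; ring
      · simp [hlt]; ring

lemma inner_eq (s : List Char) : romanToIntA s = romanToIntB s := by
  by_cases hnil : s = []
  · subst hnil; simp [romanToIntA, romanToIntB, PySem.Chars.len]
  · have hlen : PySem.Chars.len s ≠ 0 := by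
      cases s with
      | nil => exact absurd rfl hnil
      | cons c r => simp [PySem.Chars.len]; omega
    by_cases hval : ∀ c ∈ s, (romVal c).isSome
    · have hall : s.all (fun c => (romVal c).isSome) = true := by
        simpa [List.all_eq_true] using hval
      have hB : romanToIntB s = PySem.Int.toChars (bval s) := by
        rw [romanToIntB, if_neg hnil, foldB s hval]
        simp [hall]
      rw [hB, romanToIntA, if_neg hlen, loopA_valid s s none 0 hval, gval_eq_bval s hval]
      simp
    · have hinv : ∃ c ∈ s, romVal c = none := by
        push_neg at hval
        obtain ⟨c, hc, hn⟩ := hval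
        exact ⟨c, hc, Option.not_isSome_iff_eq_none.mp hn⟩
      have hall : s.all (fun c => (romVal c).isSome) = false := by
        simp only [List.all_eq_false]
        obtain ⟨c, hc, hn⟩ := hinv
        exact ⟨c, hc, by simp [hn]⟩
      simp only [romanToIntA, romanToIntB, if_neg hlen, if_neg hnil, hall]
      rw [loopA_invalid s s none 0 hinv]
      simp

-- ===== VERDICT (by name: the statement is the Claim_ definition above) =====
theorem filter_roman_spec : Claim_equal_filter_roman := by
  intro input_string _
  unfold Spec_filter_roman filter_roman filter_roman_alt
  simp only []
  congr 2
  exact List.map_congr_left (fun w _ => inner_eq w)
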